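-- pv_equiv track=rewrite | github.com/AriseOS/arise-desktop | src/clients/desktop_app/ami_daemon/base_agent/tools/eigent_browser/page_snapshot.py | _detect_priorities
-- ===== SOURCE A (Python) =====
-- from typing import TYPE_CHECKING, Any, Dict, List, Optional, Union
--
-- def _detect_priorities(snapshot_yaml: str) -> List[int]:
--     """Return sorted list of priorities present (1,2,3)."""
--     priorities = set()
--     for line in snapshot_yaml.splitlines():
--         if '[ref=' not in line:
--             continue
--         lower_line = line.lower()
--         if any(
--             r in lower_line
--             for r in (
--                 "input",
--                 "button",
--                 "select",
--                 "textarea",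
--                 "checkbox",
--                 "radio",
--                 "link",
--             )
--         ):
--             priorities.add(1)
--         elif 'label' in lower_line:
--             priorities.add(2)
--         else:
--             priorities.add(3)
--     if not priorities:
--         priorities.add(3)
--     return sorted(priorities)
-- ===== SOURCE B (Python) =====
-- def _detect_priorities(snapshot_yaml: str):
--     """Return sorted list of priorities present (1,2,3)."""
--     kws = ("input", "button", "select", "textarea", "checkbox", "radio", "link")
--     refs = [line.lower() for line in snapshot_yaml.splitlines() if '[ref=' in line]
--     p1 = any(any(k in l for k in kws) for l in refs)
--     p2 = any('label' in l and not any(k in l for k in kws) for l in refs)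
--     p3 = any('label' not in l and not any(k in l for k in kws) for l in refs)
--     out = [p for p, ok in ((1, p1), (2, p2), (3, p3)) if ok]
--     return out if out else [3]
-- ===== Notes on version B (the rewrite author's own statement) =====
-- stated objective: alternative
-- what changed: Replaces the single branching pass that accumulates a set and sorts it with three independent boolean presence scans over the ref lines, assembling the already-sorted result list directly (no set, no sort).
import Mathlib
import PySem

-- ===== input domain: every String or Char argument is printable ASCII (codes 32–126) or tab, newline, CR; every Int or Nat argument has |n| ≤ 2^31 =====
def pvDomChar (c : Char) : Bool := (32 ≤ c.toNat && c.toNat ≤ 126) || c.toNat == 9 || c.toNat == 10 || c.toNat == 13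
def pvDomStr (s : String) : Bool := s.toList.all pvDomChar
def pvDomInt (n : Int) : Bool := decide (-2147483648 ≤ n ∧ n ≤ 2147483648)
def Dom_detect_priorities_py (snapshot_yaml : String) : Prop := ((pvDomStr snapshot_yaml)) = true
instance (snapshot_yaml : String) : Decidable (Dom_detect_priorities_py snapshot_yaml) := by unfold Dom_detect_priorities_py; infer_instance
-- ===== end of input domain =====

-- B builds the already-sorted result from three independent presence scans instead of
-- accumulating a set in one branching pass and sorting it (objective: alternative).

-- ===== PORT A =====
-- loop body of A's single pass (one iteration of 'for line in snapshot_yaml.splitlines()')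
def pvStepA (priorities : PySem.Set Int) (line : String) : PySem.Set Int :=
  if !(PySem.Chars.isIn "[ref=".toList line.toList) then priorities
  else
    let lower_line := PySem.Chars.lower line.toList
    if ["input".toList, "button".toList, "select".toList, "textarea".toList,
        "checkbox".toList, "radio".toList, "link".toList].any
         (fun r => PySem.Chars.isIn r lower_line) then
      PySem.Set.add priorities 1
    else if PySem.Chars.isIn "label".toList lower_line then
      PySem.Set.add priorities 2
    else
      PySem.Set.add priorities 3

def detect_priorities_py (snapshot_yaml : String) : List Int :=
  let priorities : PySem.Set Int :=
    (PySem.Str.splitlines snapshot_yaml).foldl pvStepA PySem.Set.empty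
  PySem.List.sorted
    (if priorities = ([] : List Int) then PySem.Set.add priorities 3 else priorities)
    (fun x => x) false

-- ===== PORT B =====
def pvKws : List (List Char) :=
  ["input".toList, "button".toList, "select".toList, "textarea".toList,
   "checkbox".toList, "radio".toList, "link".toList]

def pvHasKw (l : List Char) : Bool := pvKws.any (fun k => PySem.Chars.isIn k l)

def detect_priorities_py_alt (snapshot_yaml : String) : List Int :=
  let refs : List (List Char) :=
    ((PySem.Str.splitlines snapshot_yaml).filter
        (fun line => PySem.Chars.isIn "[ref=".toList line.toList)).map
      (fun line => PySem.Chars.lower line.toList)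
  let p1 := refs.any pvHasKw
  let p2 := refs.any (fun l => PySem.Chars.isIn "label".toList l && !pvHasKw l)
  let p3 := refs.any (fun l => !(PySem.Chars.isIn "label".toList l) && !pvHasKw l)
  let out := ([((1 : Int), p1), (2, p2), (3, p3)]).filterMap
    (fun pk => if pk.2 then some pk.1 else none)
  if out = [] then [3] else out

-- ===== PRECONDITION & SPEC =====
def Spec_detect_priorities_py (snapshot_yaml : String) (out : List Int) : Prop := out = detect_priorities_py_alt snapshot_yaml
instance (snapshot_yaml : String) (out : List Int) : Decidable (Spec_detect_priorities_py snapshot_yaml out) := by unfold Spec_detect_priorities_py; infer_instance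

-- ===== CLAIM (what is proved, stated in full; the proofs are below) =====
def Claim_equal_detect_priorities_py : Prop := ∀ (snapshot_yaml : String), Dom_detect_priorities_py snapshot_yaml → Spec_detect_priorities_py snapshot_yaml (detect_priorities_py snapshot_yaml)

-- ===== LEMMAS AND PROOFS =====

-- the classification A's branches perform on a (lower-cased) ref line
def pvClassify (l : List Char) : Int :=
  if pvHasKw l then 1 else if PySem.Chars.isIn "label".toList l then 2 else 3

theorem pvStepA_eq (s : PySem.Set Int) (line : String) :
    pvStepA s line =
      if PySem.Chars.isIn "[ref=".toList line.toList then
        PySem.Set.add s (pvClassify (PySem.Chars.lower line.toList))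
      else s := by
  unfold pvStepA pvClassify pvHasKw pvKws
  cases h : PySem.Chars.isIn "[ref=".toList line.toList
  · simp
  · simp only [Bool.not_true, Bool.false_eq_true, if_false]
    split_ifs <;> rfl

theorem pvFold_eq (lines : List String) (s : PySem.Set Int) :
    lines.foldl pvStepA s =
      PySem.Set.update s
        (((lines.filter (fun line => PySem.Chars.isIn "[ref=".toList line.toList)).map
            (fun line => PySem.Chars.lower line.toList)).map pvClassify) := by
  induction lines generalizing s with
  | nil => rfl
  | cons line rest ih =>
    simp only [List.foldl_cons, List.filter_cons]
    rw [pvStepA_eq]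
    cases h : PySem.Chars.isIn "[ref=".toList line.toList <;>
      simp [ih, PySem.Set.update_cons]

theorem pvClassify_one (l : List Char) : pvClassify l = 1 ↔ pvHasKw l = true := by
  unfold pvClassify; split_ifs with h1 h2 <;> simp_all

theorem pvClassify_two (l : List Char) :
    pvClassify l = 2 ↔ (PySem.Chars.isIn "label".toList l && !pvHasKw l) = true := by
  unfold pvClassify; split_ifs with h1 h2 <;> simp_all

theorem pvClassify_three (l : List Char) :
    pvClassify l = 3 ↔ (!(PySem.Chars.isIn "label".toList l) && !pvHasKw l) = true := by
  unfold pvClassify; split_ifs with h1 h2 <;> simp_all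

theorem pvSorted_ofList (ms : List Int) (h : ∀ x ∈ ms, x = 1 ∨ x = 2 ∨ x = 3) :
    PySem.List.sorted (PySem.Set.ofList ms) (fun x => x) false =
      (if (1 : Int) ∈ ms then [(1 : Int)] else []) ++
        ((if (2 : Int) ∈ ms then [(2 : Int)] else []) ++
          (if (3 : Int) ∈ ms then [(3 : Int)] else [])) := by
  set t := (if (1 : Int) ∈ ms then [(1 : Int)] else []) ++
      ((if (2 : Int) ∈ ms then [(2 : Int)] else []) ++
        (if (3 : Int) ∈ ms then [(3 : Int)] else [])) with ht
  have hx : ∀ x, x ∈ t ↔ ((x = 1 ∧ (1 : Int) ∈ ms) ∨ (x = 2 ∧ (2 : Int) ∈ ms) ∨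
      (x = 3 ∧ (3 : Int) ∈ ms)) := by
    intro x
    rw [ht]
    split_ifs <;> simp_all
  have hmem : ∀ x, x ∈ t ↔ x ∈ ms := by
    intro x
    rw [hx]
    constructor
    · rintro (⟨rfl, hm⟩ | ⟨rfl, hm⟩ | ⟨rfl, hm⟩) <;> exact hm
    · intro hm
      rcases h x hm with rfl | rfl | rfl <;> tauto
  have hnd : t.Nodup := by rw [ht]; split_ifs <;> decide
  have hperm : t.Perm (PySem.Set.ofList ms) :=
    (List.perm_ext_iff_of_nodup hnd (PySem.Set.nodup_ofList ms)).mpr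
      (fun x => by rw [hmem, PySem.Set.mem_ofList])
  have hpair : t.Pairwise (fun a b => (fun x : Int => x) a < (fun x : Int => x) b) := by
    rw [ht]; split_ifs <;> decide
  exact PySem.List.sorted_eq_of_perm_of_pairwise_lt _ _ _ hperm hpair

-- ===== VERDICT (by name: the statement is the Claim_ definition above) =====
theorem detect_priorities_py_spec : Claim_equal_detect_priorities_py := by
  intro s _
  unfold Spec_detect_priorities_py detect_priorities_py detect_priorities_py_alt
  set ls := ((PySem.Str.splitlines s).filter
      (fun line => PySem.Chars.isIn "[ref=".toList line.toList)).map
    (fun line => PySem.Chars.lower line.toList) with hls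
  set ms := ls.map pvClassify with hms
  have hA : (PySem.Str.splitlines s).foldl pvStepA PySem.Set.empty = PySem.Set.ofList ms := by
    rw [pvFold_eq]
    rfl
  have hall : ∀ x ∈ ms, x = 1 ∨ x = 2 ∨ x = 3 := by
    intro x hx
    rw [hms] at hx
    obtain ⟨l, _, rfl⟩ := List.mem_map.mp hx
    unfold pvClassify; split_ifs <;> simp
  have h1 : ls.any pvHasKw = decide ((1 : Int) ∈ ms) := by
    rw [Bool.eq_iff_iff]
    simp only [decide_eq_true_eq, hms, List.mem_map, List.any_eq_true]
    exact ⟨fun ⟨l, hl, hf⟩ => ⟨l, hl, (pvClassify_one l).mpr hf⟩,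
      fun ⟨l, hl, hf⟩ => ⟨l, hl, (pvClassify_one l).mp hf⟩⟩
  have h2 : ls.any (fun l => PySem.Chars.isIn "label".toList l && !pvHasKw l) =
      decide ((2 : Int) ∈ ms) := by
    rw [Bool.eq_iff_iff]
    simp only [decide_eq_true_eq, hms, List.mem_map, List.any_eq_true]
    exact ⟨fun ⟨l, hl, hf⟩ => ⟨l, hl, (pvClassify_two l).mpr hf⟩,
      fun ⟨l, hl, hf⟩ => ⟨l, hl, (pvClassify_two l).mp hf⟩⟩
  have h3 : ls.any (fun l => !(PySem.Chars.isIn "label".toList l) && !pvHasKw l) =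
      decide ((3 : Int) ∈ ms) := by
    rw [Bool.eq_iff_iff]
    simp only [decide_eq_true_eq, hms, List.mem_map, List.any_eq_true]
    exact ⟨fun ⟨l, hl, hf⟩ => ⟨l, hl, (pvClassify_three l).mpr hf⟩,
      fun ⟨l, hl, hf⟩ => ⟨l, hl, (pvClassify_three l).mp hf⟩⟩
  clear_value ms ls
  clear hls hms
  simp only [hA, h1, h2, h3, List.filterMap]
  by_cases hms0 : ms = []
  · -- no ref line: A sorts {3}, B's scans are all empty and default to [3]
    rw [hms0]
    simp [PySem.Set.ofList]
    rfl
  · obtain ⟨a, ha⟩ := List.exists_mem_of_ne_nil ms hms0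
    have hne : PySem.Set.ofList ms ≠ [] := by
      intro he
      have hmema := (PySem.Set.mem_ofList ms a).mpr ha
      rw [he] at hmema
      simp at hmema
    have hone : (1 : Int) ∈ ms ∨ (2 : Int) ∈ ms ∨ (3 : Int) ∈ ms := by
      rcases hall a ha with rfl | rfl | rfl <;> tauto
    rw [if_neg hne, pvSorted_ofList ms hall]
    by_cases hm1 : (1 : Int) ∈ ms <;> by_cases hm2 : (2 : Int) ∈ ms <;>
      by_cases hm3 : (3 : Int) ∈ ms <;> (simp [hm1, hm2, hm3]; try tauto)
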